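-- pv_equiv track=rewrite | github.com/zsozso96/hazifeladat | Feladat2.py | feladat_2
-- ===== SOURCE A (Python) =====
-- def feladat_2(n):
--     primek = []
--     for i in range(1,1000):
--         osztok_szama = 0
--         for k in range(1,i+1):
--             if i%k == 0:
--                 osztok_szama+=1
--         if osztok_szama == 2:
--             primek.append(i)
--     return primek[n-1]
-- ===== SOURCE B (Python) =====
-- def feladat_2(n):
--     primek = []
--     for i in range(2, 1000):
--         prim = True
--         d = 2
--         while d * d <= i:
--             if i % d == 0:
--                 prim = False
--                 break
--             d += 1
--         if prim:
--             primek.append(i)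
--     return primek[n - 1]
-- ===== Notes on version B (the rewrite author's own statement) =====
-- stated objective: faster
-- what changed: Replaced A's count-all-divisors-of-i scan over range(1,i+1) by early-exit trial division only up to sqrt(i), collecting primes in one pass over range(2,1000).
import Mathlib
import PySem

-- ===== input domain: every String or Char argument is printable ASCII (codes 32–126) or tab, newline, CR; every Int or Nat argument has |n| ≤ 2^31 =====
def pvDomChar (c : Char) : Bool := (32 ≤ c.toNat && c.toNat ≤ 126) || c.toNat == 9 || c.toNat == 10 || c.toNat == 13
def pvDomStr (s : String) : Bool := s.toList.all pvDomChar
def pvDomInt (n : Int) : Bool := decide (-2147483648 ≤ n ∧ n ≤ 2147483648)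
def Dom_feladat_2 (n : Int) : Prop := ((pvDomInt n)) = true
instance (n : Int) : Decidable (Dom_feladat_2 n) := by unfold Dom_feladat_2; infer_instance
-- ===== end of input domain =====

-- B replaces A's full divisor-count scan over range(1,i+1) by early-exit trial division up to sqrt(i) (objective: faster).

-- ===== PORT A =====
-- A's prime list does not depend on n, so it is a constant helper
def pvPrimesA : List Int :=
  (PySem.List.pyRange 1 1000 1).foldl (fun primek i =>
    let osztok_szama : Int :=
      (PySem.List.pyRange 1 (i + 1) 1).foldl
        (fun c k => if PySem.Int.mod i k = 0 then c + 1 else c) 0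
    if osztok_szama = 2 then primek ++ [i] else primek) []

def feladat_2 (n : Int) : Int :=
  (PySem.List.pyGet? pvPrimesA (n - 1)).getD 0

-- ===== PORT B =====
-- the 'while d * d <= i: if i % d == 0: break; d += 1' loop of Source B
-- (structural recursion on a fuel that provably suffices; fuel 0 is never reached from pvTrialLoop)
def pvTrialGo (i : Int) (d : Int) : Nat → Bool
  | 0 => true
  | fuel + 1 =>
    if d * d ≤ i then
      if PySem.Int.mod i d = 0 then false
      else pvTrialGo i (d + 1) fuel
    else true

def pvTrialLoop (i d : Int) : Bool := pvTrialGo i d (i + 2 - d).toNat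

def pvPrimesB : List Int :=
  (PySem.List.pyRange 2 1000 1).foldl (fun primek i =>
    if pvTrialLoop i 2 then primek ++ [i] else primek) []

def feladat_2_alt (n : Int) : Int :=
  (PySem.List.pyGet? pvPrimesB (n - 1)).getD 0

-- ===== PRECONDITION & SPEC =====
-- Pre_ excludes exactly the n for which primek[n-1] raises IndexError in both programs (there are 168 primes below 1000)
def Pre_feladat_2 (n : Int) : Prop := -167 ≤ n ∧ n ≤ 168
instance (n : Int) : Decidable (Pre_feladat_2 n) := by unfold Pre_feladat_2; infer_instance
def pvWitness_feladat_2 : Int := 1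

def Spec_feladat_2 (n : Int) (out : Int) : Prop := out = feladat_2_alt n
instance (n : Int) (out : Int) : Decidable (Spec_feladat_2 n out) := by unfold Spec_feladat_2; infer_instance

-- ===== CLAIM (what is proved, stated in full; the proofs are below) =====
def Claim_equal_feladat_2 : Prop := ∀ (n : Int), Dom_feladat_2 n → Pre_feladat_2 n → Spec_feladat_2 n (feladat_2 n)

-- ===== LEMMAS AND PROOFS =====

-- A's inner loop counts the divisors of i among 1..i
def pvACount (i : Int) : Nat :=
  (PySem.List.pyRange 1 (i + 1) 1).countP (fun k => decide (PySem.Int.mod i k = 0))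

theorem pvA_filter :
    pvPrimesA = (PySem.List.pyRange 1 1000 1).filter (fun i => decide ((pvACount i : Int) = 2)) := by
  unfold pvPrimesA
  have hfun : (fun (primek : List Int) (i : Int) =>
      let osztok_szama : Int :=
        (PySem.List.pyRange 1 (i + 1) 1).foldl
          (fun c k => if PySem.Int.mod i k = 0 then c + 1 else c) 0
      if osztok_szama = 2 then primek ++ [i] else primek)
      = (fun (primek : List Int) (i : Int) =>
          if ((pvACount i : Int) = 2) then primek ++ [i] else primek) := by
    funext primek i
    simp only []
    rw [PySem.List.foldl_ite_add_one]
    simp [pvACount]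
  rw [hfun, PySem.List.foldl_append_ite_eq_filter]
  simp

theorem pvB_filter :
    pvPrimesB = (PySem.List.pyRange 2 1000 1).filter (fun i => pvTrialLoop i 2) := by
  unfold pvPrimesB
  rw [PySem.List.foldl_append_if_eq_filter]
  simp

-- list-count of a predicate over range n as a Finset cardinality
theorem pv_countP_range (n : Nat) (p : Nat → Bool) :
    (List.range n).countP p = ((Finset.range n).filter (fun k => p k)).card := by
  rw [List.countP_eq_length_filter,
      ← List.toFinset_card_of_nodup ((List.nodup_range).filter _),
      List.toFinset_filter, List.toFinset_range]

-- the number of divisors of n among 1..n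
theorem pv_card_divisors (n : Nat) (hn : 1 ≤ n) :
    ((Finset.range n).filter (fun k => decide ((k + 1) ∣ n))).card = n.divisors.card := by
  have himg : ((Finset.range n).filter (fun k => decide ((k + 1) ∣ n))).image (· + 1)
      = n.divisors := by
    ext m
    simp only [Finset.mem_image, Finset.mem_filter, Finset.mem_range, Nat.mem_divisors,
      decide_eq_true_eq]
    constructor
    · rintro ⟨k, ⟨hk, hd⟩, rfl⟩
      exact ⟨hd, by omega⟩
    · rintro ⟨hd, hn0⟩
      have h1 : 0 < m := Nat.pos_of_dvd_of_pos hd (by omega)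
      have hm : m ≤ n := Nat.le_of_dvd (by omega) hd
      exact ⟨m - 1, ⟨by omega, by simpa [Nat.sub_add_cancel h1] using hd⟩, by omega⟩
  rw [← himg, Finset.card_image_of_injective _ (add_left_injective 1)]

theorem pv_divisors_two_iff (n : Nat) (hn : 1 ≤ n) :
    n.divisors.card = 2 ↔ n.Prime := by
  constructor
  · intro h2
    by_contra hnp
    rcases Nat.lt_or_ge n 2 with hlt | hge
    · have hn1 : n = 1 := by omega
      subst hn1
      simp [Nat.divisors_one] at h2
    · obtain ⟨m, hm, hm2, hmn⟩ := Nat.exists_dvd_of_not_prime2 hge hnp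
      have hsub : ({1, m, n} : Finset ℕ) ⊆ n.divisors := by
        intro x hx
        simp only [Finset.mem_insert, Finset.mem_singleton] at hx
        rcases hx with rfl | rfl | rfl
        · exact Nat.one_mem_divisors.mpr (by omega)
        · exact Nat.mem_divisors.mpr ⟨hm, by omega⟩
        · exact Nat.mem_divisors.mpr ⟨dvd_refl _, by omega⟩
      have hcard : ({1, m, n} : Finset ℕ).card = 3 := by
        rw [Finset.card_insert_of_notMem (by simp; omega),
            Finset.card_insert_of_notMem (by simp; omega),
            Finset.card_singleton]
      have := Finset.card_le_card hsub
      omega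
  · intro hp
    rw [Nat.Prime.divisors hp,
        Finset.card_insert_of_notMem (by simpa using (Nat.Prime.one_lt hp).ne),
        Finset.card_singleton]

-- A's divisor count, in Nat form
theorem pvACount_eq (i : Int) (hi : 1 ≤ i) :
    pvACount i = (List.range i.toNat).countP (fun k => decide ((k + 1) ∣ i.toNat)) := by
  unfold pvACount
  rw [PySem.List.pyRange_one]
  rw [show (i + 1 - (1:Int)) = i by ring]
  rw [List.countP_map]
  refine List.countP_congr ?_
  intro k hk
  simp only [Function.comp_apply, decide_eq_true_eq]
  rw [PySem.Int.mod_eq_zero_iff_dvd]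
  have h0 : ((1 : Int) + (k : Int)) = ((k + 1 : Nat) : Int) := by push_cast; ring
  have hi0 : ((i.toNat : Nat) : Int) = i := Int.toNat_of_nonneg (by omega)
  have hdd : (((k + 1 : Nat) : Int) ∣ i) ↔ (((k + 1 : Nat) : Int) ∣ ((i.toNat : Nat) : Int)) := by
    rw [hi0]
  rw [h0, hdd, Int.natCast_dvd_natCast]

-- enough fuel: the loop's result is the no-divisor-up-to-sqrt condition
theorem pvTrialGo_iff (i : Int) :
    ∀ (fuel : Nat) (d : Int), 2 ≤ d → (i + 2 - d).toNat ≤ fuel →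
      (pvTrialGo i d fuel = true ↔ ∀ e : Int, d ≤ e → e * e ≤ i → ¬ (e ∣ i)) := by
  intro fuel
  induction fuel with
  | zero =>
    intro d hd hf
    simp only [pvTrialGo, true_iff]
    intro e hde hee hdvd
    have h1 : d * d ≤ e * e := mul_le_mul hde hde (by omega) (by omega)
    have h2 : 2 * d ≤ d * d := by nlinarith
    omega
  | succ fuel ih =>
    intro d hd hf
    simp only [pvTrialGo]
    by_cases h : d * d ≤ i
    · rw [if_pos h]
      have hdi : d < i + 2 := by nlinarith [sq_nonneg (d - 1), sq_nonneg d]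
      by_cases hm : PySem.Int.mod i d = 0
      · rw [if_pos hm]
        simp only [Bool.false_eq_true, false_iff]
        push Not
        exact ⟨d, le_rfl, h, (PySem.Int.mod_eq_zero_iff_dvd i d).mp hm⟩
      · rw [if_neg hm, ih (d + 1) (by omega) (by omega)]
        constructor
        · intro hall e hde hee
          rcases eq_or_lt_of_le hde with rfl | hlt
          · intro hdvd
            exact hm ((PySem.Int.mod_eq_zero_iff_dvd i _).mpr hdvd)
          · exact hall e (by omega) hee
        · intro hall e hde hee
          exact hall e (by omega) hee
    · rw [if_neg h]
      simp only [true_iff]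
      intro e hde hee
      exact absurd (le_trans (mul_le_mul hde hde (by omega) (by omega)) hee) h

-- the trial-division loop succeeds iff no d in [d0, sqrt i] divides i
theorem pvTrialLoop_iff (i d : Int) (hd : 2 ≤ d) :
    pvTrialLoop i d = true ↔ ∀ e : Int, d ≤ e → e * e ≤ i → ¬ (e ∣ i) := by
  exact pvTrialGo_iff i _ d hd le_rfl

theorem pvTrial_prime (i : Int) (hi : 2 ≤ i) :
    pvTrialLoop i 2 = true ↔ i.toNat.Prime := by
  rw [pvTrialLoop_iff i 2 le_rfl, Nat.prime_def_le_sqrt]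
  have hi0 : ((i.toNat : Nat) : Int) = i := Int.toNat_of_nonneg (by omega)
  constructor
  · intro hall
    refine ⟨by omega, ?_⟩
    intro m hm hsqrt hdvd
    have hmm : (m : Nat) * m ≤ i.toNat := by
      have := Nat.le_sqrt'.mp hsqrt
      rwa [pow_two] at this
    have hmmi : (m : Int) * m ≤ i := by
      rw [← hi0]
      exact_mod_cast hmm
    exact hall m (by exact_mod_cast hm) hmmi
      (by rw [← hi0, Int.natCast_dvd_natCast]; exact hdvd)
  · rintro ⟨-, hall⟩ e he hee hdvd
    have he0 : ((e.toNat : Nat) : Int) = e := Int.toNat_of_nonneg (by omega)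
    refine hall e.toNat (by omega) (Nat.le_sqrt'.mpr ?_) ?_
    · rw [pow_two, ← Nat.cast_le (α := Int)]
      push_cast
      rw [he0, hi0]
      exact hee
    · rw [← Int.natCast_dvd_natCast, he0, hi0]
      exact hdvd

theorem pvACount_prime (i : Int) (hi : 2 ≤ i) :
    ((pvACount i : Int) = 2) ↔ i.toNat.Prime := by
  rw [pvACount_eq i (by omega), pv_countP_range, pv_card_divisors _ (by omega),
      show ((2:Int)) = ((2:Nat):Int) by norm_num, Int.natCast_inj,
      pv_divisors_two_iff _ (by omega)]

theorem pvPrimes_eq : pvPrimesA = pvPrimesB := by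
  rw [pvA_filter, pvB_filter,
      PySem.List.pyRange_one_cons (by norm_num : (1:Int) < 1000),
      List.filter_cons_of_neg (by decide)]
  refine List.filter_congr ?_
  intro i hi
  have h2 : 2 ≤ i := (PySem.List.mem_pyRange_one.mp hi).1
  rw [Bool.eq_iff_iff]
  simp only [decide_eq_true_eq]
  rw [pvACount_prime i h2, ← pvTrial_prime i h2]

-- ===== VERDICT (by name: the statement is the Claim_ definition above) =====
theorem feladat_2_spec : Claim_equal_feladat_2 := by
  intro n _ _
  unfold Spec_feladat_2 feladat_2 feladat_2_alt
  rw [pvPrimes_eq]
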